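-- pv_equiv track=rewrite | github.com/aryanagarwal9/LogicTableauConstructor | tableau.py | isFormulaFOL
-- ===== SOURCE A (Python) =====
-- PRED = ('P', 'Q', 'R', 'S')
--
-- CONSTANTS = ('a', 'b', 'c', 'd', 'e', 'f', 'g', 'h', 'i', 'j')
--
-- def removeQuantifiers(fmla):
--     quantifiers = ['Ax', 'Ay', 'Az', 'Aw', 'Ex', 'Ey', 'Ez', 'Ew']
--
--     for q in quantifiers:
--         fmla = fmla.replace(q, '')
--
--     return fmla
--
-- def isFormulaFOL(fmla):
--     new_fmla = removeQuantifiers(fmla)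
--     if new_fmla != fmla:
--         return True
--
--     for p in PRED:
--         for c1 in CONSTANTS:
--             for c2 in CONSTANTS:
--                 sub_str = p + '(' + c1 + ',' + c2 + ')'
--                 if fmla.find(sub_str) != -1:
--                     return True
--
--     return False
-- ===== SOURCE B (Python) =====
-- def isFormulaFOL(fmla):
--     n = len(fmla)
--     for i in range(n):
--         c = fmla[i]
--         if c in 'AE' and i + 1 < n and fmla[i + 1] in 'xyzw':
--             return True
--         if (c in 'PQRS' and i + 5 < n and fmla[i + 1] == '('
--                 and fmla[i + 2] in 'abcdefghij' and fmla[i + 3] == ','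
--                 and fmla[i + 4] in 'abcdefghij' and fmla[i + 5] == ')'):
--             return True
--     return False
-- ===== Notes on version B (the rewrite author's own statement) =====
-- stated objective: faster
-- what changed: B replaces A's build-and-compare quantifier removal plus 400 substring searches by a single left-to-right scan that tests each position for a quantifier pair or a predicate pattern directly.
import Mathlib
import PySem

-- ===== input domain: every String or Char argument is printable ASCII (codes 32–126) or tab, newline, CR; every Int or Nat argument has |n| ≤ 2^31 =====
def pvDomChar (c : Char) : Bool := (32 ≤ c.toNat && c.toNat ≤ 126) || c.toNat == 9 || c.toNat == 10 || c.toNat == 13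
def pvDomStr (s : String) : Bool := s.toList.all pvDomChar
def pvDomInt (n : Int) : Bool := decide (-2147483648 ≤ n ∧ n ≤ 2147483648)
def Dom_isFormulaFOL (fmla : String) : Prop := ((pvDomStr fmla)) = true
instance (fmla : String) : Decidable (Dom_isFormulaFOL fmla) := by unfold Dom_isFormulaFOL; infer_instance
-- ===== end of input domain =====

-- B replaces A's replace-then-compare plus 400 substring searches by one left-to-right scan; same Bool on every string.

-- ===== PORT A =====
def PRED : List Char := ['P', 'Q', 'R', 'S']

def CONSTANTS : List Char := ['a', 'b', 'c', 'd', 'e', 'f', 'g', 'h', 'i', 'j']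

def removeQuantifiers (fmla : String) : String :=
  let quantifiers : List String := ["Ax", "Ay", "Az", "Aw", "Ex", "Ey", "Ez", "Ew"]
  quantifiers.foldl (fun f q => PySem.Str.replace f q "") fmla

def isFormulaFOL (fmla : String) : Bool :=
  let new_fmla := removeQuantifiers fmla
  if new_fmla ≠ fmla then true
  else
    PRED.any (fun p => CONSTANTS.any (fun c1 => CONSTANTS.any (fun c2 =>
      -- sub_str = p + '(' + c1 + ',' + c2 + ')' : the 6-character string
      decide (PySem.Str.find fmla (String.ofList [p, '(', c1, ',', c2, ')']) ≠ -1))))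

-- ===== PORT B =====
def isQuantVar (c : Char) : Bool := c == 'x' || c == 'y' || c == 'z' || c == 'w'

def isPredCh (c : Char) : Bool := c == 'P' || c == 'Q' || c == 'R' || c == 'S'

def isConstCh (c : Char) : Bool :=
  c == 'a' || c == 'b' || c == 'c' || c == 'd' || c == 'e' ||
  c == 'f' || c == 'g' || c == 'h' || c == 'i' || c == 'j'

-- lookahead: next char is a quantified variable
def quantTail : List Char → Bool
  | b :: _ => isQuantVar b
  | []     => false

-- lookahead: next five chars are '(' c1 ',' c2 ')'
def predTail : List Char → Bool
  | b1 :: b2 :: b3 :: b4 :: b5 :: _ =>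
      b1 == '(' && isConstCh b2 && b3 == ',' && isConstCh b4 && b5 == ')'
  | _ => false

-- the single left-to-right scan of B
def scanFOL : List Char → Bool
  | [] => false
  | c :: rest =>
      ((c == 'A' || c == 'E') && quantTail rest) ||
      (isPredCh c && predTail rest) ||
      scanFOL rest

def isFormulaFOL_alt (fmla : String) : Bool := scanFOL fmla.toList

-- ===== PRECONDITION & SPEC =====
def Spec_isFormulaFOL (fmla : String) (out : Bool) : Prop := out = isFormulaFOL_alt fmla
instance (fmla : String) (out : Bool) : Decidable (Spec_isFormulaFOL fmla out) := by unfold Spec_isFormulaFOL; infer_instance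

-- ===== CLAIM (what is proved, stated in full; the proofs are below) =====
def Claim_equal_isFormulaFOL : Prop := ∀ (fmla : String), Dom_isFormulaFOL fmla → Spec_isFormulaFOL fmla (isFormulaFOL fmla)

-- ===== LEMMAS AND PROOFS =====

-- A's quantifier substrings, on the character level
def qlists : List (List Char) :=
  [['A','x'], ['A','y'], ['A','z'], ['A','w'], ['E','x'], ['E','y'], ['E','z'], ['E','w']]

-- hit t = the scan's test at one position (head of the suffix t)
def hitFOL : List Char → Bool
  | [] => false
  | c :: rest => ((c == 'A' || c == 'E') && quantTail rest) || (isPredCh c && predTail rest)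

-- ---- PySem.Chars.replace with empty replacement: unchanged without a match, strictly shorter with one ----

theorem goRepl_no (old : List Char) :
    ∀ (fuel : Nat) (l acc : List Char), l.length ≤ fuel → ¬ old <:+: l →
      PySem.Chars.replace.go old [] fuel l acc = acc.reverse ++ l := by
  intro fuel
  induction fuel with
  | zero =>
    intro l acc hl _
    have : l = [] := List.eq_nil_of_length_eq_zero (Nat.le_zero.mp hl)
    subst this; simp [PySem.Chars.replace.go]
  | succ n ih =>
    intro l acc hl hinf
    cases l with
    | nil => simp [PySem.Chars.replace.go]
    | cons c t =>
      rw [PySem.Chars.replace.go]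
      have hnp : ¬ old <+: c :: t := fun h => hinf h.isInfix
      have hpre : old.isPrefixOf (c :: t) = false := by
        rw [Bool.eq_false_iff]
        simp [List.isPrefixOf_iff_prefix, hnp]
      rw [hpre]
      simp only [Bool.false_eq_true, if_false]
      rw [ih t (c :: acc) (by simpa using Nat.lt_succ_iff.mp (by simpa using hl))
          (fun h => hinf (List.infix_cons_iff.mpr (Or.inr h)))]
      simp

theorem goRepl_len (old : List Char) :
    ∀ (fuel : Nat) (l acc : List Char),
      (PySem.Chars.replace.go old [] fuel l acc).length ≤ acc.length + l.length := by
  intro fuel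
  induction fuel with
  | zero => intro l acc; simp [PySem.Chars.replace.go]
  | succ n ih =>
    intro l acc
    cases l with
    | nil => simp [PySem.Chars.replace.go]
    | cons c t =>
      rw [PySem.Chars.replace.go]
      by_cases hpre : old.isPrefixOf (c :: t) = true
      · rw [hpre]; simp only [if_true]
        calc (PySem.Chars.replace.go old [] n (List.drop old.length (c :: t)) ([].reverse ++ acc)).length
            ≤ ([].reverse ++ acc : List Char).length + (List.drop old.length (c :: t)).length := ih _ _
          _ ≤ acc.length + (c :: t).length := by simp
      · rw [Bool.not_eq_true] at hpre
        rw [hpre]; simp only [Bool.false_eq_true, if_false]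
        calc (PySem.Chars.replace.go old [] n t (c :: acc)).length
            ≤ (c :: acc).length + t.length := ih _ _
          _ = acc.length + (c :: t).length := by simp; omega

theorem goRepl_lt (old : List Char) (hold : old ≠ []) :
    ∀ (fuel : Nat) (l acc : List Char), l.length ≤ fuel → old <:+: l →
      (PySem.Chars.replace.go old [] fuel l acc).length < acc.length + l.length := by
  intro fuel
  induction fuel with
  | zero =>
    intro l acc hl hinf
    have : l = [] := List.eq_nil_of_length_eq_zero (Nat.le_zero.mp hl)
    subst this
    exact absurd (List.eq_nil_of_infix_nil hinf) hold
  | succ n ih =>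
    intro l acc hl hinf
    cases l with
    | nil => exact absurd (List.eq_nil_of_infix_nil hinf) hold
    | cons c t =>
      rw [PySem.Chars.replace.go]
      by_cases hpre : old.isPrefixOf (c :: t) = true
      · rw [hpre]; simp only [if_true]
        have hplen : old.length ≤ (c :: t).length :=
          (List.isPrefixOf_iff_prefix.mp hpre).length_le
        have holdpos : 0 < old.length := List.length_pos_iff.mpr hold
        calc (PySem.Chars.replace.go old [] n (List.drop old.length (c :: t)) ([].reverse ++ acc)).length
            ≤ ([].reverse ++ acc : List Char).length + (List.drop old.length (c :: t)).length := goRepl_len old _ _ _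
          _ < acc.length + (c :: t).length := by simp; omega
      · rw [Bool.not_eq_true] at hpre
        rw [hpre]; simp only [Bool.false_eq_true, if_false]
        have hnp : ¬ old <+: c :: t := by
          intro h; rw [(List.isPrefixOf_iff_prefix (l₁ := old) (l₂ := c :: t)).mpr h] at hpre; cases hpre
        have htinf : old <:+: t := (List.infix_cons_iff.mp hinf).resolve_left hnp
        calc (PySem.Chars.replace.go old [] n t (c :: acc)).length
            < (c :: acc).length + t.length := ih t (c :: acc) (by simpa using Nat.lt_succ_iff.mp (by simpa using hl)) htinf
          _ = acc.length + (c :: t).length := by simp; omega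

theorem replace_no (old l : List Char) (hold : old ≠ []) (h : ¬ old <:+: l) :
    PySem.Chars.replace l old [] = l := by
  rw [PySem.Chars.replace]
  rw [List.isEmpty_eq_false_iff.mpr hold]
  simpa using goRepl_no old l.length l [] le_rfl h

theorem replace_len_le (old l : List Char) (hold : old ≠ []) :
    (PySem.Chars.replace l old []).length ≤ l.length := by
  rw [PySem.Chars.replace, List.isEmpty_eq_false_iff.mpr hold]
  simpa using goRepl_len old l.length l []

theorem replace_lt (old l : List Char) (hold : old ≠ []) (h : old <:+: l) :
    (PySem.Chars.replace l old []).length < l.length := by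
  rw [PySem.Chars.replace, List.isEmpty_eq_false_iff.mpr hold]
  simpa using goRepl_lt old hold l.length l [] le_rfl h

theorem foldRepl_len (qs : List (List Char)) (hqs : ∀ q ∈ qs, q ≠ []) :
    ∀ l : List Char, (qs.foldl (fun l q => PySem.Chars.replace l q []) l).length ≤ l.length := by
  induction qs with
  | nil => intro l; simp
  | cons q qs ih =>
    intro l
    simp only [List.foldl_cons]
    exact le_trans (ih (fun q' hq' => hqs q' (List.mem_cons_of_mem q hq')) _)
      (replace_len_le q l (hqs q List.mem_cons_self))

theorem foldRepl_no (qs : List (List Char)) (hqs : ∀ q ∈ qs, q ≠ []) :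
    ∀ l : List Char, (∀ q ∈ qs, ¬ q <:+: l) →
      qs.foldl (fun l q => PySem.Chars.replace l q []) l = l := by
  induction qs with
  | nil => intro l _; simp
  | cons q qs ih =>
    intro l hno
    simp only [List.foldl_cons]
    rw [replace_no q l (hqs q List.mem_cons_self) (hno q List.mem_cons_self)]
    exact ih (fun q' hq' => hqs q' (List.mem_cons_of_mem q hq')) l
      (fun q' hq' => hno q' (List.mem_cons_of_mem q hq'))

theorem foldRepl_lt (qs : List (List Char)) (hqs : ∀ q ∈ qs, q ≠ []) :
    ∀ l : List Char, (∃ q ∈ qs, q <:+: l) →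
      (qs.foldl (fun l q => PySem.Chars.replace l q []) l).length < l.length := by
  induction qs with
  | nil => rintro l ⟨q, hq, -⟩; cases hq
  | cons q qs ih =>
    rintro l ⟨q', hq', hinf⟩
    simp only [List.foldl_cons]
    by_cases hq : q <:+: l
    · exact lt_of_le_of_lt
        (foldRepl_len qs (fun a ha => hqs a (List.mem_cons_of_mem q ha)) _)
        (replace_lt q l (hqs q List.mem_cons_self) hq)
    · rw [replace_no q l (hqs q List.mem_cons_self) hq]
      rcases List.mem_cons.mp hq' with rfl | hmem
      · exact absurd hinf hq
      · exact ih (fun a ha => hqs a (List.mem_cons_of_mem q ha)) l ⟨q', hmem, hinf⟩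

theorem removeQ_toList (fmla : String) :
    (removeQuantifiers fmla).toList =
      qlists.foldl (fun l q => PySem.Chars.replace l q []) fmla.toList := by
  simp [removeQuantifiers, qlists, PySem.Str.toList_replace]

theorem removeQ_ne_iff (fmla : String) :
    removeQuantifiers fmla ≠ fmla ↔ ∃ q ∈ qlists, q <:+: fmla.toList := by
  have hne : ∀ q ∈ qlists, q ≠ [] := by decide
  constructor
  · intro h
    by_contra hno
    push Not at hno
    exact h (String.toList_inj.mp (by
      rw [removeQ_toList]
      exact foldRepl_no qlists hne fmla.toList (by
        intro q hq
        exact hno q hq)))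
  · intro ⟨q, hq, hinf⟩ h
    have := foldRepl_lt qlists hne fmla.toList ⟨q, hq, hinf⟩
    rw [← removeQ_toList, h] at this
    omega

theorem A_iff (fmla : String) :
    isFormulaFOL fmla = true ↔
      (∃ q ∈ qlists, q <:+: fmla.toList) ∨
      (∃ p ∈ PRED, ∃ c1 ∈ CONSTANTS, ∃ c2 ∈ CONSTANTS,
        [p, '(', c1, ',', c2, ')'] <:+: fmla.toList) := by
  unfold isFormulaFOL
  by_cases h : removeQuantifiers fmla ≠ fmla
  · rw [if_pos h]
    simp only [true_iff]
    exact Or.inl ((removeQ_ne_iff fmla).mp h)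
  · rw [if_neg h]
    rw [← removeQ_ne_iff fmla]
    simp only [List.any_eq_true, decide_eq_true_eq, PySem.Str.find_ne_neg_one_iff,
      String.toList_ofList]
    tauto

theorem predTail_cons5 (b1 b2 b3 b4 b5 : Char) (r : List Char) :
    predTail (b1 :: b2 :: b3 :: b4 :: b5 :: r) =
      (b1 == '(' && isConstCh b2 && b3 == ',' && isConstCh b4 && b5 == ')') := rfl

theorem scan_iff (l : List Char) :
    scanFOL l = true ↔ ∃ t, t <:+ l ∧ hitFOL t = true := by
  induction l with
  | nil => simp [scanFOL, hitFOL]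
  | cons c rest ih =>
    rw [scanFOL]
    simp only [Bool.or_eq_true]
    constructor
    · rintro ((h1 | h2) | h3)
      · exact ⟨c :: rest, List.suffix_refl _, by rw [hitFOL]; simp only [Bool.or_eq_true]; exact Or.inl h1⟩
      · exact ⟨c :: rest, List.suffix_refl _, by rw [hitFOL]; simp only [Bool.or_eq_true]; exact Or.inr h2⟩
      · obtain ⟨t, ht, hhit⟩ := ih.mp h3
        exact ⟨t, ht.trans (List.suffix_cons c rest), hhit⟩
    · rintro ⟨t, ht, hhit⟩
      rcases List.suffix_cons_iff.mp ht with rfl | ht'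
      · rw [hitFOL] at hhit
        simp only [Bool.or_eq_true] at hhit
        tauto
      · exact Or.inr (ih.mpr ⟨t, ht', hhit⟩)

theorem quant_hit_iff (t : List Char) :
    (∃ q ∈ qlists, q <+: t) ↔
      ∃ c rest, t = c :: rest ∧ ((c == 'A' || c == 'E') && quantTail rest) = true := by
  constructor
  · rintro ⟨q, hq, hpre⟩
    fin_cases hq <;>
      · obtain ⟨r, rfl⟩ := hpre
        exact ⟨_, _, rfl, by simp [quantTail, isQuantVar]⟩
  · rintro ⟨c, rest, rfl, h⟩
    cases rest with
    | nil => simp [quantTail] at h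
    | cons b r =>
      simp only [Bool.and_eq_true, Bool.or_eq_true, beq_iff_eq, quantTail, isQuantVar] at h
      obtain ⟨hc, hb⟩ := h
      refine ⟨[c, b], ?_, ⟨r, rfl⟩⟩
      rcases hc with rfl | rfl <;> rcases hb with ((rfl | rfl) | rfl) | rfl <;> simp [qlists]

theorem pred_hit_iff (t : List Char) :
    (∃ p ∈ PRED, ∃ c1 ∈ CONSTANTS, ∃ c2 ∈ CONSTANTS, [p, '(', c1, ',', c2, ')'] <+: t) ↔
      ∃ c rest, t = c :: rest ∧ (isPredCh c && predTail rest) = true := by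
  constructor
  · rintro ⟨p, hp, c1, hc1, c2, hc2, hpre⟩
    obtain ⟨r, hr⟩ := hpre
    simp only [List.cons_append, List.nil_append] at hr
    subst hr
    refine ⟨p, _, rfl, ?_⟩
    simp only [PRED, CONSTANTS, List.mem_cons, List.not_mem_nil, or_false] at hp hc1 hc2
    rw [predTail_cons5]
    simp only [Bool.and_eq_true, Bool.or_eq_true, beq_iff_eq, or_assoc,
      and_true, true_and, isPredCh, isConstCh]
    exact ⟨hp, hc1, hc2⟩
  · rintro ⟨c, rest, rfl, h⟩
    rcases rest with _ | ⟨b1, _ | ⟨b2, _ | ⟨b3, _ | ⟨b4, _ | ⟨b5, r⟩⟩⟩⟩⟩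
    · rw [show predTail [] = false from rfl] at h; simp at h
    · rw [show predTail [b1] = false from rfl] at h; simp at h
    · rw [show predTail [b1, b2] = false from rfl] at h; simp at h
    · rw [show predTail [b1, b2, b3] = false from rfl] at h; simp at h
    · rw [show predTail [b1, b2, b3, b4] = false from rfl] at h; simp at h
    rw [predTail_cons5] at h
    simp only [Bool.and_eq_true, Bool.or_eq_true, beq_iff_eq, or_assoc, and_assoc,
      isPredCh, isConstCh] at h
    obtain ⟨hc, hb1, hb2, hb3, hb4, hb5⟩ := h
    subst hb1; subst hb3; subst hb5
    refine ⟨c, ?_, b2, ?_, b4, ?_, ⟨r, rfl⟩⟩ <;>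
      simp only [PRED, CONSTANTS, List.mem_cons, List.not_mem_nil, or_false]
    exacts [hc, hb2, hb4]

theorem hit_iff (t : List Char) :
    hitFOL t = true ↔
      (∃ q ∈ qlists, q <+: t) ∨
      (∃ p ∈ PRED, ∃ c1 ∈ CONSTANTS, ∃ c2 ∈ CONSTANTS,
        [p, '(', c1, ',', c2, ')'] <+: t) := by
  rw [quant_hit_iff, pred_hit_iff]
  cases t with
  | nil => simp [hitFOL]
  | cons c rest =>
    rw [hitFOL]
    simp only [Bool.or_eq_true]
    constructor
    · rintro (h | h)
      · exact Or.inl ⟨c, rest, rfl, h⟩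
      · exact Or.inr ⟨c, rest, rfl, h⟩
    · rintro (⟨c', r', he, h⟩ | ⟨c', r', he, h⟩) <;> (cases he ; tauto)

theorem B_iff (fmla : String) :
    isFormulaFOL_alt fmla = true ↔
      (∃ q ∈ qlists, q <:+: fmla.toList) ∨
      (∃ p ∈ PRED, ∃ c1 ∈ CONSTANTS, ∃ c2 ∈ CONSTANTS,
        [p, '(', c1, ',', c2, ')'] <:+: fmla.toList) := by
  rw [isFormulaFOL_alt, scan_iff]
  simp only [hit_iff, List.infix_iff_prefix_suffix]
  constructor
  · rintro ⟨t, ht, h | h⟩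
    · obtain ⟨q, hq, hpre⟩ := h
      exact Or.inl ⟨q, hq, t, hpre, ht⟩
    · obtain ⟨p, hp, c1, hc1, c2, hc2, hpre⟩ := h
      exact Or.inr ⟨p, hp, c1, hc1, c2, hc2, t, hpre, ht⟩
  · rintro (⟨q, hq, t, hpre, ht⟩ | ⟨p, hp, c1, hc1, c2, hc2, t, hpre, ht⟩)
    · exact ⟨t, ht, Or.inl ⟨q, hq, hpre⟩⟩
    · exact ⟨t, ht, Or.inr ⟨p, hp, c1, hc1, c2, hc2, hpre⟩⟩

-- ===== VERDICT (by name: the statement is the Claim_ definition above) =====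
theorem isFormulaFOL_spec : Claim_equal_isFormulaFOL := by
  intro fmla _
  unfold Spec_isFormulaFOL
  have hA := A_iff fmla
  have hB := B_iff fmla
  cases hA' : isFormulaFOL fmla <;> cases hB' : isFormulaFOL_alt fmla
  · rfl
  · exact absurd (hA.mpr (hB.mp hB')) (by simp [hA'])
  · exact absurd (hB.mpr (hA.mp hA')) (by simp [hB'])
  · rfl
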